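-- pv_equiv track=rewrite | github.com/AaronLack/C200 | Assignment7/twoMax.py | twoMax
-- ===== SOURCE A (Python) =====
-- def twoMax(xlst):
--     def mymax(x,y):
--         if x>y:
--             return x
--         else:
--             return y
--
--     if xlst == []:
--         return []
--     else:
--         return [(mymax(xlst[0][0],xlst[0][1]))] + twoMax(xlst[1:])
-- ===== SOURCE B (Python) =====
-- def twoMax(xlst):
--     result = []
--     for pair in xlst:
--         if pair[0] > pair[1]:
--             result.append(pair[0])
--         else:
--             result.append(pair[1])
--     return result
-- ===== Notes on version B (the rewrite author's own statement) =====
-- stated objective: simpler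
-- what changed: Replaced A's tail-slicing recursion with an inlined helper and list-concatenation by a flat iterative loop appending the element-wise max of each pair to an accumulator.
import Mathlib
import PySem

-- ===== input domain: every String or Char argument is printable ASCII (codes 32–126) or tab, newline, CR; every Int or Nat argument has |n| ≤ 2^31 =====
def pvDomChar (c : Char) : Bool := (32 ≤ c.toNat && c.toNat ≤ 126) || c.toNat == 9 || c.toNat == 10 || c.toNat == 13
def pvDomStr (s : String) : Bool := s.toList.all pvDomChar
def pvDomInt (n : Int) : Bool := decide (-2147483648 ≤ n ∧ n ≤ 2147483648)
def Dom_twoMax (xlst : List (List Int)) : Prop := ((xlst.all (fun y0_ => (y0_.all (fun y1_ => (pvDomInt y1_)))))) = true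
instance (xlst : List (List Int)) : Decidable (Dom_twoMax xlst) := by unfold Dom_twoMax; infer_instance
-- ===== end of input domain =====

-- B replaces A's tail-slicing recursion (with inner helper mymax) by a flat iterative
-- loop that appends the element-wise max of each pair; objective: simpler.

-- ===== PORT A =====
-- inner helper mymax of A
def twoMax_mymax (x y : Int) : Int := if x > y then x else y

-- A's recursion: empty check, head pair via indices 0 and 1, recurse on xlst[1:]
-- (the head::rest match transcribes the nonempty case, rest = xlst[1:]).
-- pyGet? … |>.getD 0 : Pre_twoMax excludes the IndexError case (pair shorter than 2).
def twoMax (xlst : List (List Int)) : List Int :=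
  match xlst with
  | [] => []
  | p :: rest =>
      [twoMax_mymax ((PySem.List.pyGet? p 0).getD 0) ((PySem.List.pyGet? p 1).getD 0)]
        ++ twoMax rest

-- ===== PORT B =====
-- iterative loop with result accumulator, explicit comparison, append
def twoMax_alt (xlst : List (List Int)) : List Int :=
  xlst.foldl
    (fun result pair =>
      if (PySem.List.pyGet? pair 0).getD 0 > (PySem.List.pyGet? pair 1).getD 0 then
        result ++ [(PySem.List.pyGet? pair 0).getD 0]
      else
        result ++ [(PySem.List.pyGet? pair 1).getD 0])
    []

-- ===== PRECONDITION & SPEC =====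
-- Pre_ excludes inputs where some pair has fewer than two elements: there A (and B) raise IndexError.
def Pre_twoMax (xlst : List (List Int)) : Prop := ∀ p ∈ xlst, 2 ≤ p.length
instance (xlst : List (List Int)) : Decidable (Pre_twoMax xlst) := by unfold Pre_twoMax; infer_instance
def pvWitness_twoMax : List (List Int) := [[3, 1], [2, 2], [5, 9, 7]]

def Spec_twoMax (xlst : List (List Int)) (out : List Int) : Prop := out = twoMax_alt xlst
instance (xlst : List (List Int)) (out : List Int) : Decidable (Spec_twoMax xlst out) := by unfold Spec_twoMax; infer_instance

-- ===== CLAIM (what is proved, stated in full; the proofs are below) =====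
def Claim_equal_twoMax : Prop := ∀ (xlst : List (List Int)), Dom_twoMax xlst → Pre_twoMax xlst → Spec_twoMax xlst (twoMax xlst)

-- ===== LEMMAS AND PROOFS =====

-- the value appended for one pair (proof-only helper)
def pvPairMax (p : List Int) : Int :=
  if (PySem.List.pyGet? p 0).getD 0 > (PySem.List.pyGet? p 1).getD 0 then
    (PySem.List.pyGet? p 0).getD 0
  else
    (PySem.List.pyGet? p 1).getD 0

theorem twoMax_alt_step_eq :
    (fun (result : List Int) (pair : List Int) =>
      if (PySem.List.pyGet? pair 0).getD 0 > (PySem.List.pyGet? pair 1).getD 0 then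
        result ++ [(PySem.List.pyGet? pair 0).getD 0]
      else
        result ++ [(PySem.List.pyGet? pair 1).getD 0])
    = fun result pair => result ++ [pvPairMax pair] := by
  funext result pair
  unfold pvPairMax
  split <;> rfl

theorem foldl_snoc_eq_map {α : Type} (g : α → Int) (xs : List α) (acc : List Int) :
    xs.foldl (fun r p => r ++ [g p]) acc = acc ++ xs.map g := by
  induction xs generalizing acc with
  | nil => simp
  | cons x xs ih => simp [List.foldl, ih]

theorem twoMax_alt_eq_map (xlst : List (List Int)) : twoMax_alt xlst = xlst.map pvPairMax := by
  unfold twoMax_alt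
  rw [twoMax_alt_step_eq, foldl_snoc_eq_map]
  rfl

theorem twoMax_eq_alt (xlst : List (List Int)) : twoMax xlst = twoMax_alt xlst := by
  rw [twoMax_alt_eq_map]
  induction xlst with
  | nil => rfl
  | cons p rest ih =>
    simp only [twoMax, List.map, ih, twoMax_mymax, pvPairMax]
    rfl

-- ===== VERDICT (by name: the statement is the Claim_ definition above) =====
theorem twoMax_spec : Claim_equal_twoMax := by
  intro xlst _ _
  exact twoMax_eq_alt xlst
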